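-- pv_equiv track=rewrite | github.com/bmoretz/Daily-Coding-Problem | py/dcp/problems/math/kth_multiple.py | kth_smallest1
-- ===== SOURCE A (Python) =====
-- def kth_smallest1(k : int) -> int:
--     """
--     brute force O(k^3)
--
--     Args:
--         k ([type]):
--     """
--     def all_possible(k):
--         solutions = []
--
--         for a in range(k):
--             for b in range(k):
--                 for c in range(k):
--                     solutions += [3**a * 5**b * 7**c]
--
--         return solutions
--
--     if k == None: return None
--     if k < 0: return 0
--
--     possible = all_possible(k)
--
--     possible = sorted(possible)
--
--     return possible[k - 1]
-- ===== SOURCE B (Python) =====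
-- def kth_smallest1(k : int) -> int:
--     """
--     k-th smallest number of the form 3**a * 5**b * 7**c,
--     via the classic three-pointer merge (ugly-number DP), O(k).
--     """
--     if k is None: return None
--     if k < 1: return 0
--
--     u = [1]
--     i3 = i5 = i7 = 0
--     while len(u) < k:
--         n3, n5, n7 = 3 * u[i3], 5 * u[i5], 7 * u[i7]
--         n = min(n3, n5, n7)
--         u.append(n)
--         if n == n3: i3 += 1
--         if n == n5: i5 += 1
--         if n == n7: i7 += 1
--
--     return u[-1]
-- ===== Notes on version B (the rewrite author's own statement) =====
-- stated objective: faster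
-- what changed: Replaces the brute-force enumeration of all k*k*k exponent triples followed by a full sort with the classic three-pointer merge (ugly-number DP) that generates the k smallest products of powers of three, five and seven directly in increasing order.
-- outside the precondition, e.g. on kth_smallest1(0): A raises IndexError, B returns 0
import Mathlib
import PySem

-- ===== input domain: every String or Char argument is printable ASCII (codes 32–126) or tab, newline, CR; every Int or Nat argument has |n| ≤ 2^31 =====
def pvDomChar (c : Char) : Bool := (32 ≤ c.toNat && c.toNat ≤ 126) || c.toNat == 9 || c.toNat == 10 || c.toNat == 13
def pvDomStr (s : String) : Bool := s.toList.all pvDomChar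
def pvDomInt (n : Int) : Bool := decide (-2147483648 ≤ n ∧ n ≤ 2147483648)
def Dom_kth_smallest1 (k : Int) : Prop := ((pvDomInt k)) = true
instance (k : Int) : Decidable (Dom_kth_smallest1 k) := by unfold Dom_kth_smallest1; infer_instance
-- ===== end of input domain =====

-- B replaces A's brute-force enumerate-all-triples-and-sort by the three-pointer merge
-- (ugly-number DP) producing the k smallest products of powers of three, five and seven in order (objective: faster).

-- ===== PORT A =====
def kth_smallest1 (k : Int) : Int :=
  -- 'if k == None: return None' cannot fire for an int argument
  if k < 0 then 0
  else
    -- all_possible(k): triple nested 'for' over range(k), 'solutions += [3**a * 5**b * 7**c]'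
    -- (a, b, c come from range(k) so they are nonnegative: '.toNat' is exact here;
    --  a Python list is a dynamic array and '+= [v]' is an O(1) append: Array.push)
    let possible : Array Int :=
      (PySem.List.pyRange 0 k 1).foldl (fun acc a =>
        (PySem.List.pyRange 0 k 1).foldl (fun acc b =>
          (PySem.List.pyRange 0 k 1).foldl (fun acc c =>
            acc.push (3 ^ a.toNat * 5 ^ b.toNat * 7 ^ c.toNat)) acc) acc) #[]
    -- sorted(possible): no key and no reverse, so exactly a stable ≤-sort of ints;
    -- List.mergeSort (· ≤ ·) is extensionally exact for it (PySem.List.sorted, an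
    -- insertion sort, computes the same list but is not evaluable at this size)
    let possible := possible.toList.mergeSort (fun a b => a ≤ b)
    -- possible[k - 1]; none = IndexError (only at k = 0), excluded by Pre_
    (PySem.List.pyGet? possible (k - 1)).getD 0

-- ===== PORT B =====
-- the while loop of Source B: len(u) grows by 1 each iteration, so 'while len(u) < k'
-- runs exactly k - 1 times; fuel = k.toNat - 1.
def pvAltLoop (fuel : Nat) (u : List Int) (i3 i5 i7 : Nat) : List Int :=
  match fuel with
  | 0 => u
  | f + 1 =>
    let n3 := 3 * u.getD i3 0   -- 3 * u[i3]; i3 < len u throughout the run, so no IndexError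
    let n5 := 5 * u.getD i5 0   -- 5 * u[i5]
    let n7 := 7 * u.getD i7 0   -- 7 * u[i7]
    let n := min n3 (min n5 n7)
    pvAltLoop f (u ++ [n])
      (if n = n3 then i3 + 1 else i3)
      (if n = n5 then i5 + 1 else i5)
      (if n = n7 then i7 + 1 else i7)

def kth_smallest1_alt (k : Int) : Int :=
  if k < 1 then 0
  else ((pvAltLoop (k.toNat - 1) [1] 0 0 0).getLast?).getD 0  -- u[-1]; u is never empty

-- ===== PRECONDITION & SPEC =====
-- Pre_ excludes only k = 0, where A raises IndexError (possible[-1] on an empty list); B returns 0 there, like A's own k < 0 branch.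
def Pre_kth_smallest1 (k : Int) : Prop := k ≠ 0
instance (k : Int) : Decidable (Pre_kth_smallest1 k) := by unfold Pre_kth_smallest1; infer_instance
def pvWitness_kth_smallest1 : Int := (3)


def Spec_kth_smallest1 (k : Int) (out : Int) : Prop := out = kth_smallest1_alt k
instance (k : Int) (out : Int) : Decidable (Spec_kth_smallest1 k out) := by unfold Spec_kth_smallest1; infer_instance

-- ===== CLAIM (what is proved, stated in full; the proofs are below) =====
def Claim_equal_kth_smallest1 : Prop := ∀ (k : Int), Dom_kth_smallest1 k → Pre_kth_smallest1 k → Spec_kth_smallest1 k (kth_smallest1 k)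

-- ===== LEMMAS AND PROOFS =====

-- the set H of "humble numbers" 3^a * 5^b * 7^c; both programs compute its k-th smallest element
def pvH (m : ℕ) : Prop := ∃ a b c : ℕ, m = 3 ^ a * 5 ^ b * 7 ^ c

theorem pvH_infinite : (setOf pvH).Infinite := by
  apply Set.infinite_of_injective_forall_mem (f := fun a : ℕ => 3 ^ a)
  · exact Nat.pow_right_injective (by norm_num)
  · exact fun a => ⟨a, 0, 0, by ring⟩

theorem pvH_nth_mem (j : ℕ) : pvH (Nat.nth pvH j) := Nat.nth_mem_of_infinite pvH_infinite j

theorem pvH_pos {m : ℕ} (h : pvH m) : 0 < m := by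
  obtain ⟨a, b, c, rfl⟩ := h
  positivity

theorem pvH_nth_zero : Nat.nth pvH 0 = 1 := by
  rw [Nat.nth_zero]
  apply le_antisymm
  · exact Nat.sInf_le ⟨0, 0, 0, by norm_num⟩
  · exact pvH_pos (Nat.sInf_mem (⟨1, 0, 0, 0, by norm_num⟩ : (setOf pvH).Nonempty))

-- any member of H above nth m is at least nth (m+1)
theorem pvH_ge_next {h m : ℕ} (hh : pvH h) (hlt : Nat.nth pvH m < h) : Nat.nth pvH (m + 1) ≤ h := by
  classical
  have hc : Nat.nth pvH (Nat.count pvH h) = h := Nat.nth_count hh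
  have hmc : m < Nat.count pvH h := by
    rw [← Nat.nth_lt_nth pvH_infinite, hc]; exact hlt
  calc Nat.nth pvH (m + 1) ≤ Nat.nth pvH (Nat.count pvH h) :=
        (Nat.nth_le_nth pvH_infinite).mpr (by omega)
    _ = h := hc

-- any member of H below nth (m+1) is nth j for some j ≤ m
theorem pvH_le_prev {h m : ℕ} (hh : pvH h) (hlt : h < Nat.nth pvH (m + 1)) :
    ∃ j ≤ m, Nat.nth pvH j = h := by
  classical
  have hc : Nat.nth pvH (Nat.count pvH h) = h := Nat.nth_count hh
  refine ⟨Nat.count pvH h, ?_, hc⟩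
  have : h ≤ Nat.nth pvH m := Nat.le_nth_of_lt_nth_succ hlt hh
  have := (Nat.nth_le_nth pvH_infinite (k := Nat.count pvH h) (n := m)).mp (by rw [hc]; exact this)
  exact this

-- unique factorization: the exponent triple is determined by the value
theorem pvF_inj {a b c a' b' c' : ℕ} (h : 3 ^ a * 5 ^ b * 7 ^ c = 3 ^ a' * 5 ^ b' * 7 ^ c') :
    a = a' ∧ b = b' ∧ c = c' := by
  have fac : ∀ (x y z : ℕ) (q : ℕ), q.Prime →
      (3 ^ x * 5 ^ y * 7 ^ z).factorization q
        = x * (3 : ℕ).factorization q + y * (5 : ℕ).factorization q + z * (7 : ℕ).factorization q := by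
    intro x y z q hq
    rw [Nat.factorization_mul (by positivity) (by positivity),
        Nat.factorization_mul (by positivity) (by positivity),
        Nat.factorization_pow, Nat.factorization_pow, Nat.factorization_pow]
    simp [mul_comm]
  have h3 := congrArg (fun f => f 3) (congrArg Nat.factorization h)
  have h5 := congrArg (fun f => f 5) (congrArg Nat.factorization h)
  have h7 := congrArg (fun f => f 7) (congrArg Nat.factorization h)
  simp only [fac _ _ _ 3 (by norm_num), fac _ _ _ 5 (by norm_num), fac _ _ _ 7 (by norm_num)] at h3 h5 h7
  have e33 : (3 : ℕ).factorization 3 = 1 := Nat.Prime.factorization_self (by norm_num)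
  have e53 : (5 : ℕ).factorization 3 = 0 := Nat.factorization_eq_zero_of_not_dvd (by norm_num)
  have e73 : (7 : ℕ).factorization 3 = 0 := Nat.factorization_eq_zero_of_not_dvd (by norm_num)
  have e35 : (3 : ℕ).factorization 5 = 0 := Nat.factorization_eq_zero_of_not_dvd (by norm_num)
  have e55 : (5 : ℕ).factorization 5 = 1 := Nat.Prime.factorization_self (by norm_num)
  have e75 : (7 : ℕ).factorization 5 = 0 := Nat.factorization_eq_zero_of_not_dvd (by norm_num)
  have e37 : (3 : ℕ).factorization 7 = 0 := Nat.factorization_eq_zero_of_not_dvd (by norm_num)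
  have e57 : (5 : ℕ).factorization 7 = 0 := Nat.factorization_eq_zero_of_not_dvd (by norm_num)
  have e77 : (7 : ℕ).factorization 7 = 1 := Nat.Prime.factorization_self (by norm_num)
  rw [e33, e53, e73] at h3
  rw [e35, e55, e75] at h5
  rw [e37, e57, e77] at h7
  omega

theorem pvH_nth_le_pow (j : ℕ) : Nat.nth pvH j ≤ 3 ^ j := by
  apply Nat.nth_le_of_strictMonoOn_of_mapsTo (f := fun a => 3 ^ a)
  · exact fun a _ => ⟨a, 0, 0, by ring⟩
  · exact fun x _ y _ hxy => Nat.pow_lt_pow_right (by norm_num) hxy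

-- index i of a strictly sorted list of casts of H-members containing nth o..nth (o+i)
theorem pvKey (i : ℕ) : ∀ (o : ℕ) (l : List Int), l.Pairwise (· < ·) →
    (∀ x ∈ l, ∃ j, o ≤ j ∧ ((Nat.nth pvH j : ℕ) : Int) = x) →
    (∀ j, o ≤ j → j ≤ o + i → ((Nat.nth pvH j : ℕ) : Int) ∈ l) →
    ∀ (hi : i < l.length), l[i] = ((Nat.nth pvH (o + i) : ℕ) : Int) := by
  induction i with
  | zero =>
    intro o l hp hmem hin hi
    match l, hp, hmem, hin, hi with
    | x :: xs, hp, hmem, hin, hi =>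
      obtain ⟨j, hoj, hjx⟩ := hmem x (by simp)
      have hno : ((Nat.nth pvH o : ℕ) : Int) ∈ x :: xs := hin o le_rfl (by omega)
      simp only [List.getElem_cons_zero, Nat.add_zero]
      rcases List.mem_cons.mp hno with h | h
      · exact h.symm
      · exfalso
        have hxlt : x < ((Nat.nth pvH o : ℕ) : Int) := (List.pairwise_cons.mp hp).1 _ h
        have : ((Nat.nth pvH o : ℕ) : Int) ≤ ((Nat.nth pvH j : ℕ) : Int) := by
          exact_mod_cast Nat.cast_le.mpr ((Nat.nth_le_nth pvH_infinite).mpr hoj)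
        omega
  | succ i ih =>
    intro o l hp hmem hin hi
    match l, hp, hmem, hin, hi with
    | x :: xs, hp, hmem, hin, hi =>
      have hpx : ∀ y ∈ xs, x < y := (List.pairwise_cons.mp hp).1
      have hpxs : xs.Pairwise (· < ·) := (List.pairwise_cons.mp hp).2
      -- head = cast (nth o)
      have hx : x = ((Nat.nth pvH o : ℕ) : Int) := by
        obtain ⟨j, hoj, hjx⟩ := hmem x (by simp)
        have hno : ((Nat.nth pvH o : ℕ) : Int) ∈ x :: xs := hin o le_rfl (by omega)
        rcases List.mem_cons.mp hno with h | h
        · exact h.symm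
        · exfalso
          have hxlt : x < ((Nat.nth pvH o : ℕ) : Int) := hpx _ h
          have : ((Nat.nth pvH o : ℕ) : Int) ≤ ((Nat.nth pvH j : ℕ) : Int) := by
            exact_mod_cast Nat.cast_le.mpr ((Nat.nth_le_nth pvH_infinite).mpr hoj)
          omega
      have hxs := ih (o + 1) xs hpxs ?_ ?_ (by simpa using hi)
      · rw [List.getElem_cons_succ, hxs, show o + 1 + i = o + (i + 1) from by omega]
      · -- every member of xs is a cast of nth j with j ≥ o + 1
        intro y hy
        obtain ⟨j, hoj, hjy⟩ := hmem y (List.mem_cons_of_mem _ hy)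
        refine ⟨j, ?_, hjy⟩
        rcases Nat.lt_or_ge o j with h | h
        · omega
        · exfalso
          have hjo : j = o := by omega
          subst hjo
          have := hpx y hy
          omega
      · -- nth j for o+1 ≤ j ≤ o+1+i is in xs
        intro j h1 h2
        have hmem' : ((Nat.nth pvH j : ℕ) : Int) ∈ x :: xs := hin j (by omega) (by omega)
        rcases List.mem_cons.mp hmem' with h | h
        · exfalso
          rw [hx] at h
          have : Nat.nth pvH j = Nat.nth pvH o := by exact_mod_cast h
          have := Nat.nth_injective pvH_infinite this
          omega
        · exact h

-- ---- A side ----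

def pvNatList (n : ℕ) : List ℕ :=
  (List.range n).flatMap fun a => (List.range n).flatMap fun b =>
    (List.range n).map fun c => 3 ^ a * 5 ^ b * 7 ^ c

theorem pvNatList_mem {n x : ℕ} :
    x ∈ pvNatList n ↔ ∃ a < n, ∃ b < n, ∃ c < n, x = 3 ^ a * 5 ^ b * 7 ^ c := by
  simp only [pvNatList, List.mem_flatMap, List.mem_map, List.mem_range]
  constructor
  · rintro ⟨a, ha, b, hb, c, hc, rfl⟩
    exact ⟨a, ha, b, hb, c, hc, rfl⟩
  · rintro ⟨a, ha, b, hb, c, hc, rfl⟩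
    exact ⟨a, ha, b, hb, c, hc, rfl⟩

theorem pvNatList_nodup (n : ℕ) : (pvNatList n).Nodup := by
  unfold pvNatList
  rw [List.nodup_flatMap]
  constructor
  · intro a _
    rw [List.nodup_flatMap]
    constructor
    · intro b _
      apply List.Nodup.map _ (List.nodup_range)
      intro c c' hcc
      exact (pvF_inj hcc).2.2
    · apply List.Pairwise.imp _ (List.nodup_range (n := n))
      intro b b' hbb
      simp only [Function.onFun, List.disjoint_left, List.mem_map]
      rintro x ⟨c, _, rfl⟩ ⟨c', _, hx⟩
      exact hbb (pvF_inj hx).2.1.symm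
  · apply List.Pairwise.imp _ (List.nodup_range (n := n))
    intro a a' haa
    simp only [Function.onFun, List.disjoint_left, List.mem_flatMap, List.mem_map]
    rintro x ⟨b, _, c, _, rfl⟩ ⟨b', _, c', _, hx⟩
    exact haa (pvF_inj hx).1.symm

theorem pvNatList_length (n : ℕ) : (pvNatList n).length = n * n * n := by
  simp [pvNatList, List.length_flatMap, List.map_const', List.sum_replicate, smul_eq_mul]
  ring

theorem pvPossible_eq (k : Int) (_hk : 0 ≤ k) :
    ((PySem.List.pyRange 0 k 1).foldl (fun acc a =>
      (PySem.List.pyRange 0 k 1).foldl (fun acc b =>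
        (PySem.List.pyRange 0 k 1).foldl (fun acc c =>
          acc.push (3 ^ a.toNat * 5 ^ b.toNat * 7 ^ c.toNat)) acc) acc) (#[] : Array Int)).toList
    = (pvNatList k.toNat).map (fun m : ℕ => (m : Int)) := by
  -- first pass the Array accumulator through .toList, turning push into ++ [·]
  have h1 : ∀ (a b : Int) (init : Array Int),
      ((PySem.List.pyRange 0 k 1).foldl (fun acc c =>
          acc.push (3 ^ a.toNat * 5 ^ b.toNat * 7 ^ c.toNat)) init).toList
        = (PySem.List.pyRange 0 k 1).foldl (fun acc c =>
            acc ++ [3 ^ a.toNat * 5 ^ b.toNat * 7 ^ c.toNat]) init.toList := by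
    intro a b init
    exact (List.foldl_hom Array.toList (fun acc c => by simp)).symm
  have h2 : ∀ (a : Int) (init : Array Int),
      ((PySem.List.pyRange 0 k 1).foldl (fun acc b =>
          (PySem.List.pyRange 0 k 1).foldl (fun acc c =>
            acc.push (3 ^ a.toNat * 5 ^ b.toNat * 7 ^ c.toNat)) acc) init).toList
        = (PySem.List.pyRange 0 k 1).foldl (fun acc b =>
            (PySem.List.pyRange 0 k 1).foldl (fun acc c =>
              acc ++ [3 ^ a.toNat * 5 ^ b.toNat * 7 ^ c.toNat]) acc) init.toList := by
    intro a init
    exact (List.foldl_hom Array.toList (fun acc b => (h1 a b acc).symm)).symm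
  have h3 :
      ((PySem.List.pyRange 0 k 1).foldl (fun acc a =>
        (PySem.List.pyRange 0 k 1).foldl (fun acc b =>
          (PySem.List.pyRange 0 k 1).foldl (fun acc c =>
            acc.push (3 ^ a.toNat * 5 ^ b.toNat * 7 ^ c.toNat)) acc) acc) (#[] : Array Int)).toList
        = (PySem.List.pyRange 0 k 1).foldl (fun acc a =>
            (PySem.List.pyRange 0 k 1).foldl (fun acc b =>
              (PySem.List.pyRange 0 k 1).foldl (fun acc c =>
                acc ++ [3 ^ a.toNat * 5 ^ b.toNat * 7 ^ c.toNat]) acc) acc) ([] : List Int) :=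
    (List.foldl_hom Array.toList (fun acc a => (h2 a acc).symm)).symm
  rw [h3]
  simp only [PySem.List.foldl_append_singleton_eq_map, PySem.List.foldl_append_eq_flatMap,
    List.nil_append, PySem.List.pyRange_one, sub_zero, zero_add, List.flatMap_map,
    List.map_map]
  rw [pvNatList, List.map_flatMap]
  refine congrArg (fun f => List.flatMap f (List.range k.toNat)) (funext fun a => ?_)
  rw [List.map_flatMap]
  refine congrArg (fun f => List.flatMap f (List.range k.toNat)) (funext fun b => ?_)
  rw [List.map_map]
  refine congrArg (fun f => List.map f (List.range k.toNat)) (funext fun c => ?_)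
  simp only [Function.comp_def, Int.toNat_natCast]
  push_cast
  ring

theorem pvA_eq (k : Int) (hk : 1 ≤ k) :
    kth_smallest1 k = ((Nat.nth pvH (k.toNat - 1) : ℕ) : Int) := by
  classical
  simp only [kth_smallest1]
  rw [if_neg (by omega), pvPossible_eq k (by omega)]
  set n := k.toNat with hn
  have hn1 : 1 ≤ n := by omega
  set s := ((pvNatList n).map (fun m : ℕ => (m : Int))).mergeSort (fun a b => decide (a ≤ b)) with hs
  have hperm : s.Perm ((pvNatList n).map (fun m : ℕ => (m : Int))) :=
    List.mergeSort_perm _ _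
  have hle : s.Pairwise (fun a b => a ≤ b) := by
    have := List.pairwise_mergeSort (le := fun a b : Int => decide (a ≤ b))
      (fun a b c hab hbc => by simp at hab hbc ⊢; omega)
      (fun a b => by simp; omega)
      ((pvNatList n).map (fun m : ℕ => (m : Int)))
    refine this.imp ?_
    intro a b h
    simpa using h
  have hnodup : s.Nodup := by
    refine (List.Perm.nodup_iff hperm).mpr ?_
    exact List.Nodup.map (fun x y h => by exact_mod_cast h) (pvNatList_nodup n)
  have hlt : s.Pairwise (· < ·) :=
    (hle.and hnodup).imp (fun h => lt_of_le_of_ne h.1 h.2)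
  have hlen : n - 1 < s.length := by
    rw [hperm.length_eq, List.length_map, pvNatList_length]
    have h1 : n ≤ n * n * n := by nlinarith
    omega
  have hmem : ∀ x ∈ s, ∃ j, 0 ≤ j ∧ ((Nat.nth pvH j : ℕ) : Int) = x := by
    intro x hx
    have hx' : x ∈ (pvNatList n).map (fun m : ℕ => (m : Int)) := hperm.mem_iff.mp hx
    obtain ⟨m, hm, rfl⟩ := List.mem_map.mp hx'
    obtain ⟨a, _, b, _, c, _, rfl⟩ := pvNatList_mem.mp hm
    have hHm : pvH (3 ^ a * 5 ^ b * 7 ^ c) := ⟨a, b, c, rfl⟩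
    exact ⟨Nat.count pvH _, Nat.zero_le _, by rw [Nat.nth_count hHm]⟩
  have hin : ∀ j, 0 ≤ j → j ≤ 0 + (n - 1) → ((Nat.nth pvH j : ℕ) : Int) ∈ s := by
    intro j _ hj
    have hle3 : Nat.nth pvH j ≤ 3 ^ (n - 1) :=
      le_trans ((Nat.nth_le_nth pvH_infinite).mpr (by omega)) (pvH_nth_le_pow (n - 1))
    obtain ⟨a, b, c, hfac⟩ := pvH_nth_mem j
    have h3 : (3 : ℕ) ^ a ≤ 3 ^ (n - 1) := by
      calc (3 : ℕ) ^ a ≤ 3 ^ a * (5 ^ b * 7 ^ c) := Nat.le_mul_of_pos_right _ (by positivity)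
        _ = Nat.nth pvH j := by rw [hfac]; ring
        _ ≤ 3 ^ (n - 1) := hle3
    have h5 : (5 : ℕ) ^ b ≤ 5 ^ (n - 1) := by
      calc (5 : ℕ) ^ b ≤ 5 ^ b * (3 ^ a * 7 ^ c) := Nat.le_mul_of_pos_right _ (by positivity)
        _ = Nat.nth pvH j := by rw [hfac]; ring
        _ ≤ 3 ^ (n - 1) := hle3
        _ ≤ 5 ^ (n - 1) := Nat.pow_le_pow_left (by norm_num) _
    have h7 : (7 : ℕ) ^ c ≤ 7 ^ (n - 1) := by
      calc (7 : ℕ) ^ c ≤ 7 ^ c * (3 ^ a * 5 ^ b) := Nat.le_mul_of_pos_right _ (by positivity)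
        _ = Nat.nth pvH j := by rw [hfac]; ring
        _ ≤ 3 ^ (n - 1) := hle3
        _ ≤ 7 ^ (n - 1) := Nat.pow_le_pow_left (by norm_num) _
    have ha : a < n := by
      have := (Nat.pow_le_pow_iff_right (by norm_num : 1 < 3)).mp h3; omega
    have hb : b < n := by
      have := (Nat.pow_le_pow_iff_right (by norm_num : 1 < 5)).mp h5; omega
    have hc : c < n := by
      have := (Nat.pow_le_pow_iff_right (by norm_num : 1 < 7)).mp h7; omega
    refine hperm.mem_iff.mpr (List.mem_map.mpr ⟨Nat.nth pvH j, ?_, rfl⟩)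
    exact pvNatList_mem.mpr ⟨a, ha, b, hb, c, hc, hfac⟩
  have hidx : k - 1 = ((n - 1 : ℕ) : Int) := by omega
  rw [hidx, PySem.List.pyGet?_natCast, List.getElem?_eq_getElem hlen]
  simp only [Option.getD_some]
  have hkey := pvKey (n - 1) 0 s hlt hmem hin hlen
  simpa using hkey

-- ---- B side ----

def pvP (p i m : ℕ) : Prop :=
  i ≤ m ∧ (∀ j < i, p * Nat.nth pvH j ≤ Nat.nth pvH m) ∧ Nat.nth pvH m < p * Nat.nth pvH i

def pvInv (u : List Int) (i3 i5 i7 m : ℕ) : Prop :=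
  u = (List.range (m + 1)).map (fun j => ((Nat.nth pvH j : ℕ) : Int)) ∧
  pvP 3 i3 m ∧ pvP 5 i5 m ∧ pvP 7 i7 m

theorem pvH_mul_nth {p j : ℕ} (hp : pvH p) : pvH (p * Nat.nth pvH j) := by
  obtain ⟨a, b, c, rfl⟩ := hp
  obtain ⟨a', b', c', h⟩ := pvH_nth_mem j
  exact ⟨a + a', b + b', c + c', by rw [h]; ring⟩

theorem pvP_ge {p i m : ℕ} (hcl : pvH (p * Nat.nth pvH i)) (h : pvP p i m) :
    Nat.nth pvH (m + 1) ≤ p * Nat.nth pvH i :=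
  pvH_ge_next hcl h.2.2

theorem pvP_le {p i m : ℕ} (hp : 2 ≤ p) {h' : ℕ} (hh' : pvH h')
    (hph : p * h' = Nat.nth pvH (m + 1)) (h : pvP p i m) :
    p * Nat.nth pvH i ≤ Nat.nth pvH (m + 1) := by
  have h'pos : 0 < h' := pvH_pos hh'
  have hlt : h' < Nat.nth pvH (m + 1) := by nlinarith
  obtain ⟨j, hj, hnj⟩ := pvH_le_prev hh' hlt
  have hmlt : Nat.nth pvH m < Nat.nth pvH (m + 1) :=
    (Nat.nth_lt_nth pvH_infinite).mpr (by omega)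
  have hij : i ≤ j := by
    by_contra hc
    push Not at hc
    have := h.2.1 j hc
    rw [hnj] at this
    omega
  calc p * Nat.nth pvH i ≤ p * Nat.nth pvH j :=
        Nat.mul_le_mul_left _ ((Nat.nth_le_nth pvH_infinite).mpr hij)
    _ = p * h' := by rw [hnj]
    _ = _ := hph

theorem pvMin_eq {i3 i5 i7 m : ℕ} (h3 : pvP 3 i3 m) (h5 : pvP 5 i5 m) (h7 : pvP 7 i7 m) :
    min (3 * Nat.nth pvH i3) (min (5 * Nat.nth pvH i5) (7 * Nat.nth pvH i7))
      = Nat.nth pvH (m + 1) := by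
  have h3H : pvH (3 * Nat.nth pvH i3) := pvH_mul_nth ⟨1, 0, 0, by norm_num⟩
  have h5H : pvH (5 * Nat.nth pvH i5) := pvH_mul_nth ⟨0, 1, 0, by norm_num⟩
  have h7H : pvH (7 * Nat.nth pvH i7) := pvH_mul_nth ⟨0, 0, 1, by norm_num⟩
  have hM1 : 1 < Nat.nth pvH (m + 1) := by
    have := (Nat.nth_lt_nth pvH_infinite (k := 0) (n := m + 1)).mpr (by omega)
    rwa [pvH_nth_zero] at this
  obtain ⟨a, b, c, hM⟩ := pvH_nth_mem (m + 1)
  apply le_antisymm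
  · have habc : a ≠ 0 ∨ b ≠ 0 ∨ c ≠ 0 := by
      by_contra hc
      push Not at hc
      obtain ⟨rfl, rfl, rfl⟩ := hc
      simp at hM
      omega
    rcases habc with ha | hb | hc
    · refine le_trans (min_le_left _ _) (pvP_le (by norm_num) ⟨a - 1, b, c, rfl⟩ ?_ h3)
      rw [hM]
      calc 3 * (3 ^ (a - 1) * 5 ^ b * 7 ^ c) = 3 ^ (a - 1 + 1) * 5 ^ b * 7 ^ c := by ring
        _ = 3 ^ a * 5 ^ b * 7 ^ c := by rw [Nat.sub_add_cancel (by omega)]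
    · refine le_trans (le_trans (min_le_right _ _) (min_le_left _ _))
        (pvP_le (by norm_num) ⟨a, b - 1, c, rfl⟩ ?_ h5)
      rw [hM]
      calc 5 * (3 ^ a * 5 ^ (b - 1) * 7 ^ c) = 3 ^ a * 5 ^ (b - 1 + 1) * 7 ^ c := by ring
        _ = 3 ^ a * 5 ^ b * 7 ^ c := by rw [Nat.sub_add_cancel (by omega)]
    · refine le_trans (le_trans (min_le_right _ _) (min_le_right _ _))
        (pvP_le (by norm_num) ⟨a, b, c - 1, rfl⟩ ?_ h7)
      rw [hM]
      calc 7 * (3 ^ a * 5 ^ b * 7 ^ (c - 1)) = 3 ^ a * 5 ^ b * 7 ^ (c - 1 + 1) := by ring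
        _ = 3 ^ a * 5 ^ b * 7 ^ c := by rw [Nat.sub_add_cancel (by omega)]
  · exact le_min (pvP_ge h3H h3) (le_min (pvP_ge h5H h5) (pvP_ge h7H h7))

theorem pvPStep {p i m : ℕ} (hp : 0 < p) (hcl : pvH (p * Nat.nth pvH i)) (h : pvP p i m) :
    pvP p (if Nat.nth pvH (m + 1) = p * Nat.nth pvH i then i + 1 else i) (m + 1) := by
  have hge : Nat.nth pvH (m + 1) ≤ p * Nat.nth pvH i := pvP_ge hcl h
  have hmlt : Nat.nth pvH m < Nat.nth pvH (m + 1) :=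
    (Nat.nth_lt_nth pvH_infinite).mpr (by omega)
  have hi : i ≤ m := h.1
  split_ifs with heq
  · refine ⟨by omega, ?_, ?_⟩
    · intro j hj
      rcases Nat.lt_or_ge j i with hji | hji
      · exact le_trans (h.2.1 j hji) (le_of_lt hmlt)
      · have hji' : j = i := by omega
        subst hji'
        omega
    · have hlt : Nat.nth pvH i < Nat.nth pvH (i + 1) :=
        (Nat.nth_lt_nth pvH_infinite).mpr (by omega)
      rw [heq]
      exact Nat.mul_lt_mul_of_le_of_lt (le_refl p) hlt hp
  · exact ⟨by omega, fun j hj => le_trans (h.2.1 j hj) (le_of_lt hmlt),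
      lt_of_le_of_ne hge heq⟩

theorem pvLoop (f : ℕ) : ∀ (u : List Int) (i3 i5 i7 m : ℕ), pvInv u i3 i5 i7 m →
    pvAltLoop f u i3 i5 i7 = (List.range (m + f + 1)).map (fun j => ((Nat.nth pvH j : ℕ) : Int)) := by
  induction f with
  | zero =>
    intro u i3 i5 i7 m h
    rw [show m + 0 + 1 = m + 1 from by omega]
    simpa [pvAltLoop] using h.1
  | succ f ih =>
    intro u i3 i5 i7 m h
    obtain ⟨hu, h3, h5, h7⟩ := h
    have hgd : ∀ i : ℕ, i ≤ m → u.getD i 0 = ((Nat.nth pvH i : ℕ) : Int) := by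
      intro i hi
      rw [hu]
      rw [List.getD_eq_getElem?_getD, List.getElem?_map, List.getElem?_range (by omega : i < m + 1)]
      rfl
    have hgd3 := hgd i3 h3.1
    have hgd5 := hgd i5 h5.1
    have hgd7 := hgd i7 h7.1
    have h3H : pvH (3 * Nat.nth pvH i3) := pvH_mul_nth ⟨1, 0, 0, by norm_num⟩
    have h5H : pvH (5 * Nat.nth pvH i5) := pvH_mul_nth ⟨0, 1, 0, by norm_num⟩
    have h7H : pvH (7 * Nat.nth pvH i7) := pvH_mul_nth ⟨0, 0, 1, by norm_num⟩
    have hmin : min (3 * ((Nat.nth pvH i3 : ℕ) : Int))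
        (min (5 * ((Nat.nth pvH i5 : ℕ) : Int)) (7 * ((Nat.nth pvH i7 : ℕ) : Int)))
        = ((Nat.nth pvH (m + 1) : ℕ) : Int) := by
      rw [← pvMin_eq h3 h5 h7]
      push_cast [Nat.cast_min]
      ring_nf
    have hc : ∀ p i : ℕ, ((((Nat.nth pvH (m + 1) : ℕ) : Int) = (p : ℕ) * ((Nat.nth pvH i : ℕ) : Int))
        ↔ (Nat.nth pvH (m + 1) = p * Nat.nth pvH i)) := by
      intro p i
      exact_mod_cast Iff.rfl
    simp only [pvAltLoop, hgd3, hgd5, hgd7, hmin]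
    rw [show (3 : Int) * ((Nat.nth pvH i3 : ℕ) : Int) = (((3 : ℕ) : Int)) * ((Nat.nth pvH i3 : ℕ) : Int) from by norm_num,
        show (5 : Int) * ((Nat.nth pvH i5 : ℕ) : Int) = (((5 : ℕ) : Int)) * ((Nat.nth pvH i5 : ℕ) : Int) from by norm_num,
        show (7 : Int) * ((Nat.nth pvH i7 : ℕ) : Int) = (((7 : ℕ) : Int)) * ((Nat.nth pvH i7 : ℕ) : Int) from by norm_num]
    simp only [hc]
    have hu' : u ++ [((Nat.nth pvH (m + 1) : ℕ) : Int)]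
        = (List.range (m + 1 + 1)).map (fun j => ((Nat.nth pvH j : ℕ) : Int)) := by
      rw [hu]
      simp [List.range_succ]
    rw [hu']
    have := ih _ _ _ _ (m + 1)
      ⟨rfl, pvPStep (by norm_num) h3H h3, pvPStep (by norm_num) h5H h5, pvPStep (by norm_num) h7H h7⟩
    rw [this, show m + 1 + f + 1 = m + (f + 1) + 1 from by omega]

theorem pvB_eq (k : Int) (hk : 1 ≤ k) :
    kth_smallest1_alt k = ((Nat.nth pvH (k.toNat - 1) : ℕ) : Int) := by
  unfold kth_smallest1_alt
  rw [if_neg (by omega)]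
  have base : pvInv [1] 0 0 0 0 := by
    refine ⟨by simp [pvH_nth_zero], ?_, ?_, ?_⟩ <;>
      exact ⟨le_rfl, fun j hj => absurd hj (by omega), by rw [pvH_nth_zero]; norm_num⟩
  rw [pvLoop (k.toNat - 1) [1] 0 0 0 0 base,
    show 0 + (k.toNat - 1) + 1 = k.toNat from by omega]
  have hn1 : 1 ≤ k.toNat := by omega
  rw [List.getLast?_eq_getElem?]
  simp only [List.length_map, List.length_range, List.getElem?_map,
    List.getElem?_range (by omega : k.toNat - 1 < k.toNat)]
  rfl

-- ===== VERDICT (by name: the statement is the Claim_ definition above) =====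
theorem kth_smallest1_spec : Claim_equal_kth_smallest1 := by
  intro k _ hpre
  unfold Spec_kth_smallest1
  rcases lt_trichotomy k 0 with hlt | heq | hgt
  · unfold kth_smallest1 kth_smallest1_alt
    rw [if_pos hlt, if_pos (by omega)]
  · exact absurd heq hpre
  · rw [pvA_eq k (by omega), pvB_eq k (by omega)]
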